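-- pv_equiv track=rewrite | github.com/skariyania/py-conceptual | lcs_semantic_string.py | provider_runner
-- ===== SOURCE A (Python) =====
-- def provider_runner(runnable):
--     """ runner function implements executable """
--     parsed = get_parsed_runnable(runnable=runnable)
--     max_continuity = 0
--     left_index = 0
--     right_index = 1
--     input_length = len(parsed)
--     if input_length < 2:
--         return max_continuity
--     for index, _ in enumerate(parsed):
--         right_value = parsed[right_index]
--         left_value = parsed[left_index]
--         interim_continuity = 0
--         while (
--             comparator(right_value, left_value)
--         ):
--             interim_continuity += 1
--             max_continuity = max(interim_continuity, max_continuity)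
--             left_index -= 1
--             right_index += 1
--             if left_index < 0 or right_index >= input_length:
--                 break
--             right_value = parsed[right_index]
--             left_value = parsed[left_index]
--         left_index = index
--         right_index = index + 1
--     return max_continuity
--
-- def comparator(curr, prev):
--     """ checks previous and current value falls as required semantic """
--     p_checklist = ["(", "?"]
--     c_checklist = [")", "?"]
--     return curr in c_checklist and prev in p_checklist
--
-- def get_parsed_runnable(runnable):
--     """ converts string to required list format """
--     return list(runnable)
-- ===== SOURCE B (Python) =====
-- def provider_runner(runnable):
--     """ runner function implements executable """
--     # close_run[i] = length of the run of ")"/"?" characters starting at index i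
--     close_run = [0]
--     for ch in reversed(runnable):
--         close_run.append(close_run[-1] + 1 if ch in ")?" else 0)
--     close_run.reverse()
--     best = 0
--     open_run = 0
--     for ch, cr in zip(runnable, close_run[1:]):
--         open_run = open_run + 1 if ch in "(?" else 0
--         best = max(best, min(open_run, cr))
--     return best
-- ===== Notes on version B (the rewrite author's own statement) =====
-- stated objective: alternative
-- what changed: Replaced A's expand-around-every-center scan (nested while inside the for loop, O(n^2) worst case) by two linear passes over run lengths: a backward pass computing the run of ')'/'?' starting at each index and a forward pass tracking the run of '('/'?' ending at each index, taking max over min(open_run(c), close_run(c+1)).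
import Mathlib
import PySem

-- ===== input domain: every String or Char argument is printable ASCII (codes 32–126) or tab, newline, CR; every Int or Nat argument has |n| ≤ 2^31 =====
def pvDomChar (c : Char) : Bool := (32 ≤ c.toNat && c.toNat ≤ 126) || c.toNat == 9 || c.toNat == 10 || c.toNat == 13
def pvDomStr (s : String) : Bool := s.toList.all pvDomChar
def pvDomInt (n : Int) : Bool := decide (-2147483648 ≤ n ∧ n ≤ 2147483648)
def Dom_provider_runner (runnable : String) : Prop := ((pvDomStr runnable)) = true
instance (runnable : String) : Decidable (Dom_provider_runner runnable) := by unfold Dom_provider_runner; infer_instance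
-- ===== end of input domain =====

-- B replaces A's expand-around-each-center scan (nested loops) by two linear passes over run lengths (objective: alternative algorithm; not measurably faster on benchmarked inputs).

-- ===== PORT A =====
-- parsed[i]: every access is provably in range; the ' ' default of the out-of-range fallback is unreachable.
def pvGetA (s : List Char) (i : Int) : Char := (PySem.List.pyGet? s i).getD ' '

-- comparator(curr, prev): curr in [")", "?"] and prev in ["(", "?"]
def comparatorA (curr prev : Char) : Bool :=
  (curr = ')' || curr = '?') && (prev = '(' || prev = '?')

-- the inner `while` of A; fuel = len(parsed)+1 at every call site, which never runs out
def innerA (s : List Char) (n : Int) (fuel : Nat) (l r interim maxc : Int) (rv lv : Char) : Int :=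
  match fuel with
  | 0 => maxc
  | fuel + 1 =>
    if comparatorA rv lv then
      let interim' := interim + 1
      let maxc' := max interim' maxc
      let l' := l - 1
      let r' := r + 1
      if l' < 0 ∨ r' ≥ n then maxc'
      else innerA s n fuel l' r' interim' maxc' (pvGetA s r') (pvGetA s l')
    else maxc

-- body of `for index, _ in enumerate(parsed)` ; state = (max_continuity, left_index, right_index)
def outerStepA (parsed : List Char) (n : Int) (st : Int × Int × Int) (p : Int × Char) : Int × Int × Int :=
  let maxc := innerA parsed n (parsed.length + 1) st.2.1 st.2.2 0 st.1
                (pvGetA parsed st.2.2) (pvGetA parsed st.2.1)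
  (maxc, p.1, p.1 + 1)

def provider_runner (runnable : String) : Int :=
  let parsed := runnable.toList
  let n : Int := parsed.length
  if n < 2 then 0
  else ((PySem.List.enumerate parsed 0).foldl (outerStepA parsed n) (0, 0, 1)).1

-- ===== PORT B =====
def isOpB (c : Char) : Bool := c = '(' || c = '?'
def isClB (c : Char) : Bool := c = ')' || c = '?'

-- python appends while scanning reversed(runnable) and then reverses; consing at the front
-- of the accumulator builds the same final (reversed) list, with close_run[-1] = headI.
def closeStepB (acc : List Int) (ch : Char) : List Int :=
  (if isClB ch then acc.headI + 1 else 0) :: acc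

def closeRuns (s : List Char) : List Int := s.reverse.foldl closeStepB [0]

-- body of `for ch, cr in zip(runnable, close_run[1:])` ; state = (best, open_run)
def altStepB (st : Int × Int) (p : Char × Int) : Int × Int :=
  let o := if isOpB p.1 then st.2 + 1 else 0
  (max st.1 (min o p.2), o)

def provider_runner_alt (runnable : String) : Int :=
  let s := runnable.toList
  let cr := closeRuns s
  ((s.zip cr.tail).foldl altStepB (0, 0)).1

-- ===== PRECONDITION & SPEC =====
def Spec_provider_runner (runnable : String) (out : Int) : Prop := out = provider_runner_alt runnable
instance (runnable : String) (out : Int) : Decidable (Spec_provider_runner runnable out) := by unfold Spec_provider_runner; infer_instance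

-- ===== CLAIM (what is proved, stated in full; the proofs are below) =====
def Claim_equal_provider_runner : Prop := ∀ (runnable : String), Dom_provider_runner runnable → Spec_provider_runner runnable (provider_runner runnable)

-- ===== LEMMAS AND PROOFS =====

-- length of the run of characters satisfying P at the front of a list
def runP (P : Char → Bool) : List Char → Int
  | [] => 0
  | c :: t => if P c then runP P t + 1 else 0

-- per-center terms: walking forward, pre = reversed prefix before the current char
def termsL : List Char → List Char → List Int
  | _, [] => []
  | pre, c :: u => min (runP isOpB (c :: pre)) (runP isClB u) :: termsL (c :: pre) u

def tailRuns : List Char → List Int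
  | [] => [0]
  | c :: t => runP isClB (c :: t) :: tailRuns t

def bpairs : List Char → List (Char × Int)
  | [] => []
  | c :: t => (c, runP isClB t) :: bpairs t

lemma runP_nonneg (P : Char → Bool) (t : List Char) : 0 ≤ runP P t := by
  induction t with
  | nil => simp [runP]
  | cons c t ih => simp only [runP]; split <;> omega

lemma getA_at (a b : List Char) (c : Char) (i : Int) (hi : i = a.length) :
    pvGetA (a ++ c :: b) i = c := by
  subst hi
  rw [pvGetA, PySem.List.pyGet?_natCast]
  rw [List.getElem?_append_right (le_refl a.length)]
  simp

lemma headI_tailRuns (t : List Char) : (tailRuns t).headI = runP isClB t := by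
  cases t <;> simp [tailRuns, runP]

lemma tailRuns_cons_form (t : List Char) : tailRuns t = runP isClB t :: (tailRuns t).tail := by
  cases t <;> simp [tailRuns, runP]

lemma closeRuns_eq (t : List Char) : closeRuns t = tailRuns t := by
  induction t with
  | nil => simp [closeRuns, tailRuns]
  | cons c t ih =>
    have : closeRuns (c :: t) = closeStepB (closeRuns t) c := by
      simp [closeRuns, List.reverse_cons, List.foldl_append]
    rw [this, ih, closeStepB, headI_tailRuns]
    simp [tailRuns, runP]

lemma zip_tailRuns (t : List Char) : t.zip (tailRuns t).tail = bpairs t := by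
  induction t with
  | nil => simp [bpairs]
  | cons c t ih =>
    show (c :: t).zip (tailRuns t) = bpairs (c :: t)
    rw [tailRuns_cons_form t]
    simp [bpairs, ih]

lemma bfold (u : List Char) : ∀ (pre : List Char) (best : Int),
    (List.foldl altStepB (best, runP isOpB pre) (bpairs u)).1
      = List.foldl max best (termsL pre u) := by
  induction u with
  | nil => intro pre best; simp [bpairs, termsL]
  | cons c u ih =>
    intro pre best
    show (List.foldl altStepB (altStepB (best, runP isOpB pre) (c, runP isClB u)) (bpairs u)).1 = _
    have ho : (if isOpB c then runP isOpB pre + 1 else 0) = runP isOpB (c :: pre) := by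
      simp [runP]
    simp only [altStepB, ho]
    rw [ih (c :: pre) (max best (min (runP isOpB (c :: pre)) (runP isClB u)))]
    simp [termsL]

lemma alt_eq_termsL (runnable : String) :
    provider_runner_alt runnable = List.foldl max 0 (termsL [] runnable.toList) := by
  show ((runnable.toList.zip (closeRuns runnable.toList).tail).foldl altStepB (0, 0)).1 = _
  rw [closeRuns_eq, zip_tailRuns]
  have := bfold runnable.toList [] 0
  simpa [runP] using this

lemma innerA_eq (s : List Char) : ∀ (fuel : Nat) (pre mid post : List Char) (x y : Char)
    (interim maxc l r : Int),
    s = pre.reverse ++ x :: mid ++ y :: post →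
    post.length + 1 ≤ fuel →
    l = pre.length → r = (pre.length : Int) + 1 + mid.length →
    innerA s (s.length) fuel l r interim maxc y x
      = (if min (runP isOpB (x :: pre)) (runP isClB (y :: post)) = 0 then maxc
         else max (interim + min (runP isOpB (x :: pre)) (runP isClB (y :: post))) maxc) := by
  intro fuel
  induction fuel with
  | zero => intro pre mid post x y interim maxc l r hs hf; omega
  | succ fuel ih =>
    intro pre mid post x y interim maxc l r hs hf hl hr
    have hop := runP_nonneg isOpB pre
    have hcp := runP_nonneg isClB post
    by_cases hc : comparatorA y x = true
    · have hy : isClB y = true := by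
        simp [comparatorA, isClB] at hc ⊢; tauto
      have hx : isOpB x = true := by
        simp [comparatorA, isOpB] at hc ⊢; tauto
      have hlen : (s.length : Int) = (pre.length : Int) + 1 + mid.length + 1 + post.length := by
        subst hs; push_cast; simp; ring
      rw [innerA, if_pos hc]
      simp only [runP, hx, hy, if_pos]
      by_cases hbrk : l - 1 < 0 ∨ r + 1 ≥ (s.length : Int)
      · rw [if_pos hbrk]
        rcases hbrk with h1 | h2
        · have hpre : pre = [] := by
            have : pre.length = 0 := by omega
            exact List.length_eq_zero_iff.mp this
          have hrp : runP isOpB pre = 0 := by rw [hpre]; simp [runP]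
          rw [hrp]
          split_ifs <;> omega
        · have hpost : post = [] := by
            have : post.length = 0 := by omega
            exact List.length_eq_zero_iff.mp this
          have hrp : runP isClB post = 0 := by rw [hpost]; simp [runP]
          rw [hrp]
          split_ifs <;> omega
      · rw [if_neg hbrk]
        obtain ⟨h1, h2⟩ := not_or.mp hbrk
        obtain ⟨x', pre', hpre⟩ : ∃ x' pre', pre = x' :: pre' := by
          cases pre with
          | nil => exfalso; simp at hl; omega
          | cons a b => exact ⟨a, b, rfl⟩
        obtain ⟨y', post', hpost⟩ : ∃ y' post', post = y' :: post' := by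
          cases post with
          | nil => exfalso; simp at hlen; omega
          | cons a b => exact ⟨a, b, rfl⟩
        have hpl : (pre.length : Int) = (pre'.length : Int) + 1 := by rw [hpre]; simp
        have hg1 : pvGetA s (l - 1) = x' := by
          rw [hs, hpre,
            show (x' :: pre').reverse ++ x :: mid ++ y :: post
              = pre'.reverse ++ x' :: (x :: mid ++ y :: post) by simp]
          exact getA_at _ _ _ _ (by simp only [List.length_reverse]; omega)
        have hg2 : pvGetA s (r + 1) = y' := by
          rw [hs, hpost,
            show pre.reverse ++ x :: mid ++ y :: y' :: post'
              = (pre.reverse ++ x :: mid ++ [y]) ++ y' :: post' by simp]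
          exact getA_at _ _ _ _ (by simp; omega)
        rw [hg1, hg2]
        rw [ih pre' (x :: mid ++ [y]) post' x' y' (interim + 1) (max (interim + 1) maxc)
              (l - 1) (r + 1)
              (by rw [hs, hpre, hpost]; simp)
              (by rw [hpost] at hf; simp at hf ⊢; omega)
              (by omega)
              (by simp; omega)]
        rw [← hpre, ← hpost]
        split_ifs <;> omega
    · rw [innerA, if_neg hc]
      have : min (runP isOpB (x :: pre)) (runP isClB (y :: post)) = 0 := by
        have : ¬ (isClB y = true ∧ isOpB x = true) := by
          intro ⟨hy, hx⟩; exact hc (by simp [comparatorA, isClB, isOpB] at hy hx ⊢; tauto)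
        simp only [runP]
        by_cases hx : isOpB x = true
        · have hy : ¬ isClB y = true := fun h => this ⟨h, hx⟩
          simp [hx, hy]; omega
        · simp [hx]; omega
      rw [if_pos this]

lemma aouter (s : List Char) (u : List Char) : ∀ (pre : List Char) (x : Char) (m : Int),
    0 ≤ m → s = pre.reverse ++ x :: u →
    (List.foldl (outerStepA s (s.length)) (m, (pre.length : Int), (pre.length : Int) + 1)
        (PySem.List.enumerate u ((pre.length : Int) + 1))).1
      = List.foldl max m (termsL pre (x :: u)) := by
  induction u with
  | nil =>
    intro pre x m hm hs
    have ha := runP_nonneg isOpB (x :: pre)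
    simp only [PySem.List.enumerate_nil, List.foldl_nil, termsL, runP, List.foldl_cons]
    omega
  | cons y u' ih =>
    intro pre x m hm hs
    have hx : pvGetA s ((pre.length : Int)) = x := by
      rw [hs]; exact getA_at _ _ _ _ (by simp)
    have hy : pvGetA s ((pre.length : Int) + 1) = y := by
      rw [hs, show pre.reverse ++ x :: y :: u' = (pre.reverse ++ [x]) ++ y :: u' by simp]
      exact getA_at _ _ _ _ (by simp)
    have hlen : s.length = pre.length + u'.length + 2 := by rw [hs]; simp; omega
    have he := innerA_eq s (s.length + 1) pre [] u' x y 0 m (pre.length) ((pre.length : Int) + 1)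
      (by rw [hs]; simp) (by omega) rfl (by simp)
    have he1 := runP_nonneg isOpB (x :: pre)
    have he2 := runP_nonneg isClB (y :: u')
    rw [PySem.List.enumerate_cons, List.foldl_cons]
    show (List.foldl (outerStepA s ↑s.length)
        (innerA s ↑s.length (s.length + 1) ↑pre.length (↑pre.length + 1) 0 m
            (pvGetA s (↑pre.length + 1)) (pvGetA s ↑pre.length),
          (pre.length : Int) + 1, (pre.length : Int) + 1 + 1)
        (PySem.List.enumerate u' ((pre.length : Int) + 1 + 1))).1 = _
    rw [hx, hy, he]
    have hmax : (if min (runP isOpB (x :: pre)) (runP isClB (y :: u')) = 0 then m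
        else max (0 + min (runP isOpB (x :: pre)) (runP isClB (y :: u'))) m)
        = max m (min (runP isOpB (x :: pre)) (runP isClB (y :: u'))) := by
      split_ifs <;> omega
    rw [hmax]
    have hcast : ((x :: pre).length : Int) = (pre.length : Int) + 1 := by simp
    have := ih (x :: pre) y (max m (min (runP isOpB (x :: pre)) (runP isClB (y :: u'))))
      (by omega) (by rw [hs]; simp)
    rw [hcast] at this
    rw [this]
    simp only [termsL, List.foldl_cons]

theorem provider_runner_spec : Claim_equal_provider_runner := by
  intro runnable _hdom
  show provider_runner runnable = provider_runner_alt runnable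
  rw [alt_eq_termsL]
  cases hs : runnable.toList with
  | nil => simp [provider_runner, hs, termsL]
  | cons x t =>
    cases t with
    | nil =>
      have h1 := runP_nonneg isOpB [x]
      have h0 : runP isClB ([] : List Char) = 0 := by simp [runP]
      have hmin : min (runP isOpB [x]) (runP isClB ([] : List Char)) = 0 := by omega
      simp [provider_runner, hs, termsL, hmin]
    | cons y u =>
      set s := runnable.toList with hsdef
      have hslen : s.length = u.length + 2 := by rw [hs]; simp
      have hnot : ¬ ((s.length : Int) < 2) := by omega
      simp only [provider_runner, ← hsdef, if_neg hnot]
      rw [hs, PySem.List.enumerate_cons, List.foldl_cons, ← hs]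
      have hx : pvGetA s (0 : Int) = x := by
        rw [hs, show x :: y :: u = [] ++ x :: (y :: u) from rfl]
        exact getA_at _ _ _ _ (by simp)
      have hy : pvGetA s (1 : Int) = y := by
        rw [hs, show x :: y :: u = [x] ++ y :: u from rfl]
        exact getA_at _ _ _ _ (by simp)
      have he := innerA_eq s (s.length + 1) [] [] u x y 0 0 0 1
        (by rw [hs]; simp) (by omega) (by simp) (by simp)
      have he1 := runP_nonneg isOpB [x]
      have he2 := runP_nonneg isClB (y :: u)
      show (List.foldl (outerStepA s ↑s.length)
          (innerA s ↑s.length (s.length + 1) 0 1 0 0 (pvGetA s 1) (pvGetA s 0), 0, 0 + 1)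
          (PySem.List.enumerate (y :: u) (0 + 1))).1 = _
      rw [hx, hy, he]
      set e0 := min (runP isOpB [x]) (runP isClB (y :: u)) with he0
      have hm : (if e0 = 0 then (0:Int) else max (0 + e0) 0) = e0 := by split_ifs <;> omega
      rw [hm]
      simp only [zero_add]
      have hout := aouter s (y :: u) [] x e0 (by omega) (by rw [hs]; simp)
      simp only [List.length_nil, Nat.cast_zero, zero_add] at hout
      rw [hout, hs]
      simp only [termsL, List.foldl_cons, ← he0]
      rw [show max e0 e0 = e0 from max_self e0, show max 0 e0 = e0 from max_eq_right (by omega)]
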